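-- pv_equiv track=rewrite | github.com/LeoB29/splendor_ai | nn_input_output.py | _compute_tokens_returned
-- ===== SOURCE A (Python) =====
-- def _compute_tokens_returned(player_tokens: dict, tokens_taken: dict, limit: int = 10) -> dict:
--     # After taking tokens_taken, return enough tokens to satisfy token cap (limit)
--     # Greedy: return from colors with highest counts first
--     after = player_tokens.copy()
--     for c, k in tokens_taken.items():
--         after[c] = after.get(c, 0) + k
--     total = sum(after.values())
--     excess = max(0, total - limit)
--     if excess == 0:
--         return {}
--     # Order colors by current count desc; include gold as valid return
--     order = sorted([("diamond"), ("sapphire"), ("obsidian"), ("ruby"), ("emerald"), ("gold")], key=lambda c: after.get(c, 0), reverse=True)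
--     ret: dict = {}
--     i = 0
--     while excess > 0 and i < len(order):
--         c = order[i]
--         available = after.get(c, 0)
--         if available <= 0:
--             i += 1
--             continue
--         take = min(available, excess)
--         ret[c] = ret.get(c, 0) + take
--         after[c] -= take
--         excess -= take
--         i += 1
--         if i >= len(order) and excess > 0:
--             # Restart to drain remaining counts if any
--             order = sorted(order, key=lambda c: after.get(c, 0), reverse=True)
--             i = 0
--     return ret
-- ===== SOURCE B (Python) =====
-- # B: repeated first-max selection over the fixed color list instead of an up-front sort.
-- _COLORS = ["diamond", "sapphire", "obsidian", "ruby", "emerald", "gold"]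
--
-- def _compute_tokens_returned(player_tokens: dict, tokens_taken: dict, limit: int = 10) -> dict:
--     after = player_tokens.copy()
--     for c, k in tokens_taken.items():
--         after[c] = after.get(c, 0) + k
--     excess = max(0, sum(after.values()) - limit)
--     ret: dict = {}
--     used = set()
--     while excess > 0:
--         best = None
--         for c in _COLORS:
--             if c in used:
--                 continue
--             v = after.get(c, 0)
--             if v > 0 and (best is None or v > after.get(best, 0)):
--                 best = c
--         if best is None:
--             break
--         t = min(after.get(best, 0), excess)
--         ret[best] = t
--         used.add(best)
--         excess -= t
--     return ret
-- ===== Notes on version B (the rewrite author's own statement) =====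
-- stated objective: alternative
-- what changed: B replaces A's up-front stable sort of the six colors (and A's vacuous restart re-sort) by a repeated scan of the fixed color list that selects the unused color with the strictly greatest positive count (first in list order on ties), taking tokens until the excess is gone.
import Mathlib
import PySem

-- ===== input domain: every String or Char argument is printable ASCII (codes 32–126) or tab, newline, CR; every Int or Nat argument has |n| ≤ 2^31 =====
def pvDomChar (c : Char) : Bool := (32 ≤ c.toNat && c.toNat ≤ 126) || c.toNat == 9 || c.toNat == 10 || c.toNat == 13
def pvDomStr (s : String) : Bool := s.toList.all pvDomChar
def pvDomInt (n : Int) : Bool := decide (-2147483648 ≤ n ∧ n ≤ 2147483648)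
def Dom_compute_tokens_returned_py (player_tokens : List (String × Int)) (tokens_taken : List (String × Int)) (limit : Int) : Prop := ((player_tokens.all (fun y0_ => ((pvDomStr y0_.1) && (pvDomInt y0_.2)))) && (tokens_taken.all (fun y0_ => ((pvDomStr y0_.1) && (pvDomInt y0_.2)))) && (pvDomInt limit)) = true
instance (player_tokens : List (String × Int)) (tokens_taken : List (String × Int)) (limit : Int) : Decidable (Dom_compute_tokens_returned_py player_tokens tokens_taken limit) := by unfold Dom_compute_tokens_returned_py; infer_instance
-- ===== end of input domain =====

-- B replaces A's up-front sort (plus its vacuous "restart" re-sort) by repeated first-max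
-- selection over the fixed color list; objective: simpler/alternative structure, same values.

-- ===== PORT A =====
def pvColors : List String := ["diamond", "sapphire", "obsidian", "ruby", "emerald", "gold"]

-- after = player_tokens.copy(); for c, k in tokens_taken.items(): after[c] = after.get(c, 0) + k
def pvAfter (player_tokens tokens_taken : List (String × Int)) : PySem.Dict String Int :=
  (PySem.Dict.ofList tokens_taken).items.foldl
    (fun d p => d.insert p.1 (d.getD p.1 0 + p.2)) (PySem.Dict.ofList player_tokens)

-- A's while loop over the sorted order, with the restart re-sort
def pvLoopA (after : PySem.Dict String Int) (order : List String)
    (ret : PySem.Dict String Int) (excess : Int) (i : Nat) : PySem.Dict String Int :=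
  if h : 0 < excess ∧ i < order.length then
    let c := order[i]'h.2
    let available := after.getD c 0
    if available ≤ 0 then
      pvLoopA after order ret excess (i + 1)
    else
      let take := min available excess
      let ret' := ret.insert c (ret.getD c 0 + take)
      let after' := after.insert c (available - take)
      let excess' := excess - take
      if order.length ≤ i + 1 ∧ 0 < excess' then
        pvLoopA after' (PySem.List.sorted order (fun x => after'.getD x 0) true) ret' excess' 0
      else
        pvLoopA after' order ret' excess' (i + 1)
  else ret
termination_by (excess.toNat, order.length - i)
decreasing_by
  · exact Prod.Lex.right _ (by omega)
  · exact Prod.Lex.left _ _ (by simp only [excess', take, available, c] at *; omega)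
  · exact Prod.Lex.left _ _ (by simp only [excess', take, available, c] at *; omega)

def compute_tokens_returned_py (player_tokens : List (String × Int)) (tokens_taken : List (String × Int)) (limit : Int) : List (String × Int) :=
  let after := pvAfter player_tokens tokens_taken
  let total := after.values.foldl (· + ·) 0
  let excess := max 0 (total - limit)
  if excess == 0 then []
  else
    (pvLoopA after (PySem.List.sorted pvColors (fun c => after.getD c 0) true)
      PySem.Dict.empty excess 0).items

-- ===== PORT B =====
-- B's inner scan: first unused color with a strictly greatest positive count
def pvSelectBest (after : PySem.Dict String Int) (used : PySem.Set String) : Option String :=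
  pvColors.foldl
    (fun best c =>
      if used.contains c then best
      else
        let v := after.getD c 0
        match best with
        | none => if 0 < v then some c else none
        | some b => if 0 < v ∧ after.getD b 0 < v then some c else best)
    none

-- needed for pvLoopB's termination: the selected color has a positive count
theorem pvSelScan_pos (after : PySem.Dict String Int) (used : PySem.Set String)
    (l : List String) : ∀ (acc : Option String),
      (∀ x, acc = some x → 0 < after.getD x 0) →
      ∀ b, l.foldl
        (fun best c =>
          if used.contains c then best
          else
            let v := after.getD c 0
            match best with
            | none => if 0 < v then some c else none
            | some b => if 0 < v ∧ after.getD b 0 < v then some c else best) acc = some b →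
        0 < after.getD b 0 := by
  induction l with
  | nil => intro acc hacc b hb; exact hacc b (by simpa using hb)
  | cons c r ih =>
    intro acc hacc b hb
    rw [List.foldl_cons] at hb
    refine ih _ ?_ b hb
    intro x hx
    by_cases hu : used.contains c
    · rw [if_pos hu] at hx; exact hacc x hx
    · rw [if_neg hu] at hx
      cases acc with
      | none =>
        by_cases hp : 0 < after.getD c 0
        · simp only [if_pos hp] at hx
          cases hx; exact hp
        · simp only [if_neg hp] at hx
          cases hx
      | some a =>
        by_cases hcond : 0 < after.getD c 0 ∧ after.getD a 0 < after.getD c 0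
        · simp only [if_pos hcond] at hx
          cases hx; exact hcond.1
        · simp only [if_neg hcond] at hx
          exact hacc x hx

theorem pvSelectBest_pos (after : PySem.Dict String Int) (used : PySem.Set String)
    (b : String) (h : pvSelectBest after used = some b) : 0 < after.getD b 0 := by
  unfold pvSelectBest at h
  exact pvSelScan_pos after used pvColors none (by intro x hx; cases hx) b h

def pvLoopB (after : PySem.Dict String Int) (used : PySem.Set String)
    (ret : PySem.Dict String Int) (excess : Int) : PySem.Dict String Int :=
  if 0 < excess then
    match h : pvSelectBest after used with
    | none => ret
    | some best =>
      pvLoopB after (used.add best) (ret.insert best (min (after.getD best 0) excess))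
        (excess - min (after.getD best 0) excess)
  else ret
termination_by excess.toNat
decreasing_by have := pvSelectBest_pos after used best h; omega

def compute_tokens_returned_py_alt (player_tokens : List (String × Int)) (tokens_taken : List (String × Int)) (limit : Int) : List (String × Int) :=
  let after := pvAfter player_tokens tokens_taken
  let excess := max 0 (after.values.foldl (· + ·) 0 - limit)
  (pvLoopB after PySem.Set.empty PySem.Dict.empty excess).items

-- ===== PRECONDITION & SPEC =====
def Spec_compute_tokens_returned_py (player_tokens : List (String × Int)) (tokens_taken : List (String × Int)) (limit : Int) (out : List (String × Int)) : Prop := out = compute_tokens_returned_py_alt player_tokens tokens_taken limit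
instance (player_tokens : List (String × Int)) (tokens_taken : List (String × Int)) (limit : Int) (out : List (String × Int)) : Decidable (Spec_compute_tokens_returned_py player_tokens tokens_taken limit out) := by unfold Spec_compute_tokens_returned_py; infer_instance

-- ===== CLAIM (what is proved, stated in full; the proofs are below) =====
def Claim_equal_compute_tokens_returned_py : Prop := ∀ (player_tokens : List (String × Int)) (tokens_taken : List (String × Int)) (limit : Int), Dom_compute_tokens_returned_py player_tokens tokens_taken limit → Spec_compute_tokens_returned_py player_tokens tokens_taken limit (compute_tokens_returned_py player_tokens tokens_taken limit)

-- ===== LEMMAS AND PROOFS =====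

-- one pass of A's greedy, reading counts from a fixed dict (no restart, no write-back)
def pvGreedy (af : PySem.Dict String Int) (l : List String)
    (ret : PySem.Dict String Int) (e : Int) : PySem.Dict String Int :=
  match l with
  | [] => ret
  | c :: r =>
    if e ≤ 0 then ret
    else if af.getD c 0 ≤ 0 then pvGreedy af r ret e
    else pvGreedy af r (ret.insert c (ret.getD c 0 + min (af.getD c 0) e)) (e - min (af.getD c 0) e)

-- Python max-scan: first element attaining the maximum key
def pvPick (k : String → Int) (acc : Option String) (y : String) : Option String :=
  match acc with
  | none => some y
  | some b => if k b < k y then some y else acc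

def pvFirstMax? (k : String → Int) (xs : List String) : Option String :=
  xs.foldl (pvPick k) none

theorem pvGreedy_nonpos (af : PySem.Dict String Int) (l : List String)
    (ret : PySem.Dict String Int) (e : Int) (h : ∀ c ∈ l, af.getD c 0 ≤ 0) :
    pvGreedy af l ret e = ret := by
  revert h
  induction l with
  | nil => intro _; rfl
  | cons c r ih =>
    intro h
    simp only [pvGreedy]
    by_cases he : e ≤ 0
    · rw [if_pos he]
    · rw [if_neg he, if_pos (h c (List.mem_cons_self))]
      exact ih (fun x hx => h x (List.mem_cons_of_mem _ hx))

theorem pvGreedy_of_nonpos_e (af : PySem.Dict String Int) (l : List String)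
    (ret : PySem.Dict String Int) (e : Int) (he : e ≤ 0) : pvGreedy af l ret e = ret := by
  cases l with
  | nil => rfl
  | cons c r => simp only [pvGreedy]; rw [if_pos he]

theorem pvGreedy_congr (af af' : PySem.Dict String Int) (l : List String)
    (ret : PySem.Dict String Int) (e : Int) (h : ∀ c ∈ l, af.getD c 0 = af'.getD c 0) :
    pvGreedy af l ret e = pvGreedy af' l ret e := by
  revert ret e h
  induction l with
  | nil => intro _ _ _; rfl
  | cons c r ih =>
    intro ret e h
    have hc := h c List.mem_cons_self
    simp only [pvGreedy, hc]
    split_ifs <;>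
      first
        | rfl
        | exact ih _ _ (fun x hx => h x (List.mem_cons_of_mem _ hx))

theorem pvLoopA_nonpos (af : PySem.Dict String Int) (order : List String)
    (ret : PySem.Dict String Int) (e : Int) (i : Nat) (h : ∀ c ∈ order, af.getD c 0 ≤ 0) :
    pvLoopA af order ret e i = ret := by
  fun_induction pvLoopA af order ret e i with
  | case1 af or r ex i hg c av hav ih => exact ih h
  | case2 af or r ex i hg c av hav t r2 a2 e2 hrs ih =>
      exact absurd (h _ (List.getElem_mem hg.2)) (by omega)
  | case3 af or r ex i hg c av hav t r2 a2 e2 hrs ih =>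
      exact absurd (h _ (List.getElem_mem hg.2)) (by omega)
  | case4 af or r ex i hg => rfl

theorem pvNe_of_drop (order : List String) (i : Nat) (hnd : order.Nodup)
    (hi : i < order.length) : ∀ x ∈ order.drop (i + 1), x ≠ order[i]'hi := by
  intro x hx he
  obtain ⟨m, hm, hxe⟩ := List.mem_iff_getElem.mp hx
  rw [List.getElem_drop] at hxe
  subst he
  have : i + 1 + m = i := (hnd.getElem_inj_iff).mp hxe
  omega

theorem pvLoopA_eq_greedy (af : PySem.Dict String Int) (order : List String)
    (ret : PySem.Dict String Int) (e : Int) (i : Nat) (hnd : order.Nodup)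
    (hinv : 0 < e → ∀ j (hj : j < order.length), j < i → af.getD (order[j]'hj) 0 ≤ 0) :
    pvLoopA af order ret e i = pvGreedy af (order.drop i) ret e := by
  revert hnd hinv
  fun_induction pvLoopA af order ret e i with
  | case1 af or r ex i hg c av hav ih =>
    intro hnd hinv
    rw [ih hnd ?_]
    · rw [← List.getElem_cons_drop hg.2]
      simp only [pvGreedy]
      rw [if_neg (by omega), if_pos (by omega)]
    · intro hex j hj hji
      by_cases hji' : j < i
      · exact hinv hex j hj hji'
      · have : j = i := by omega
        subst this
        omega
  | case2 af or r ex i hg c av hav t r2 a2 e2 hrs ih =>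
    intro hnd hinv
    rw [pvLoopA_nonpos]
    · -- RHS: drop i = [order[i]]
      rw [← List.getElem_cons_drop hg.2, List.drop_eq_nil_of_le (by omega)]
      simp only [pvGreedy]
      rw [if_neg (by omega), if_neg (by omega)]
    · intro x hx
      rw [PySem.List.mem_sorted] at hx
      obtain ⟨j, hj, rfl⟩ := List.mem_iff_getElem.mp hx
      by_cases hje : j = i
      · subst hje
        rw [PySem.Dict.getD_insert_self]
        omega
      · have hne : or[j] ≠ or[i]'hg.2 := by
          intro he; exact hje ((hnd.getElem_inj_iff).mp he)
        rw [PySem.Dict.getD_insert_of_ne _ _ _ hne]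
        exact hinv hg.1 j hj (by omega)
  | case3 af or r ex i hg c av hav t r2 a2 e2 hrs ih =>
    intro hnd hinv
    rw [ih hnd ?_]
    · rw [pvGreedy_congr a2 af _ _ _ ?_]
      · rw [← List.getElem_cons_drop hg.2]
        simp only [pvGreedy]
        rw [if_neg (by omega), if_neg (by omega)]
      · intro x hx
        rw [PySem.Dict.getD_insert_of_ne _ _ _ (pvNe_of_drop or i hnd hg.2 x hx)]
    · intro hex j hj hji
      by_cases hje : j = i
      · subst hje
        rw [PySem.Dict.getD_insert_self]
        omega
      · have hne : or[j] ≠ or[i]'hg.2 := by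
          intro he; exact hje ((hnd.getElem_inj_iff).mp he)
        rw [PySem.Dict.getD_insert_of_ne _ _ _ hne]
        exact hinv hg.1 j hj (by omega)
  | case4 af or r ex i hg =>
    intro hnd hinv
    by_cases hi : or.length ≤ i
    · rw [List.drop_eq_nil_of_le hi]; rfl
    · rw [← List.getElem_cons_drop (by omega : i < or.length)]
      simp only [pvGreedy]
      rw [if_pos (by omega)]

theorem pvPick_fold_ne_none (k : String → Int) :
    ∀ (l : List String) (b : String), l.foldl (pvPick k) (some b) ≠ none := by
  intro l
  induction l with
  | nil => intro b h; cases h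
  | cons c r ih =>
    intro b
    rw [List.foldl_cons]
    show r.foldl (pvPick k) (pvPick k (some b) c) ≠ none
    by_cases hlt : k b < k c
    · simp only [pvPick, if_pos hlt]; exact ih c
    · simp only [pvPick, if_neg hlt]; exact ih b

theorem pvFirstMax?_eq_none (k : String → Int) (xs : List String) :
    pvFirstMax? k xs = none ↔ xs = [] := by
  constructor
  · intro h
    cases xs with
    | nil => rfl
    | cons c r =>
      exfalso
      unfold pvFirstMax? at h
      rw [List.foldl_cons] at h
      exact pvPick_fold_ne_none k r c h
  · intro h; subst h; rfl

theorem pvPick_fold_mem (k : String → Int) :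
    ∀ (l : List String) (acc : Option String) (b : String),
      l.foldl (pvPick k) acc = some b → b ∈ l ∨ acc = some b := by
  intro l
  induction l with
  | nil => intro acc b h; right; exact h
  | cons c r ih =>
    intro acc b h
    rw [List.foldl_cons] at h
    rcases ih (pvPick k acc c) b h with hb | hb
    · left; exact List.mem_cons_of_mem _ hb
    · cases acc with
      | none =>
        simp only [pvPick] at hb
        left; cases hb; exact List.mem_cons_self
      | some a =>
        simp only [pvPick] at hb
        by_cases hlt : k a < k c
        · rw [if_pos hlt] at hb; left; cases hb; exact List.mem_cons_self
        · rw [if_neg hlt] at hb; right; exact hb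

theorem pvFirstMax?_mem (k : String → Int) (xs : List String) (m : String)
    (h : pvFirstMax? k xs = some m) : m ∈ xs := by
  rcases pvPick_fold_mem k xs none m h with hm | hm
  · exact hm
  · cases hm

theorem pvPick_fold_isMax (k : String → Int) :
    ∀ (l : List String) (acc : Option String) (b : String),
      l.foldl (pvPick k) acc = some b →
      (∀ y ∈ l, k y ≤ k b) ∧ (∀ x, acc = some x → k x ≤ k b) := by
  intro l
  induction l with
  | nil =>
    intro acc b h
    refine ⟨by simp, fun x hx => ?_⟩
    rw [hx] at h; cases h; exact le_rfl
  | cons c r ih =>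
    intro acc b h
    rw [List.foldl_cons] at h
    obtain ⟨h1, h2⟩ := ih (pvPick k acc c) b h
    have hc : k c ≤ k b := by
      cases acc with
      | none => exact h2 c rfl
      | some a =>
        by_cases hlt : k a < k c
        · exact h2 c (by simp [pvPick, hlt])
        · exact le_trans (by omega) (h2 a (by simp [pvPick, hlt]))
    refine ⟨fun y hy => ?_, fun x hx => ?_⟩
    · rcases List.mem_cons.mp hy with rfl | hy
      · exact hc
      · exact h1 y hy
    · cases acc with
      | none => cases hx
      | some a =>
        injection hx with hax
        subst hax
        by_cases hlt : k a < k c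
        · have := h2 c (by simp [pvPick, hlt]); omega
        · exact h2 a (by simp [pvPick, hlt])

theorem pvFirstMax?_isMax (k : String → Int) (xs : List String) (m : String)
    (h : pvFirstMax? k xs = some m) : ∀ y ∈ xs, k y ≤ k m :=
  (pvPick_fold_isMax k xs none m h).1

theorem pvFirstMax?_append_singleton (k : String → Int) (ys : List String) (x : String) :
    pvFirstMax? k (ys ++ [x]) =
      match pvFirstMax? k ys with
      | none => some x
      | some m => if k m < k x then some x else some m := by
  unfold pvFirstMax?
  rw [List.foldl_append, List.foldl_cons, List.foldl_nil]
  cases h : ys.foldl (pvPick k) none with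
  | none => rfl
  | some m => rfl

theorem pvSorted_append_singleton (k : String → Int) (ys : List String) (x : String) :
    PySem.List.sorted (ys ++ [x]) k true =
      PySem.List.insertBy (fun a b => decide (k b < k a)) x (PySem.List.sorted ys k true) := by
  rw [PySem.List.sorted_rev_eq_foldl_insertBy, List.foldl_append,
    ← PySem.List.sorted_rev_eq_foldl_insertBy, List.foldl_cons, List.foldl_nil]

-- stable reverse sort extracts the first maximal element at the head
theorem pvSorted_extract (k : String → Int) (xs : List String) (m : String)
    (hnd : xs.Nodup) (h : pvFirstMax? k xs = some m) :
    PySem.List.sorted xs k true = m :: PySem.List.sorted (xs.erase m) k true := by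
  revert m hnd h
  induction xs using List.reverseRecOn with
  | nil => intro m hnd h; cases h
  | append_singleton ys x ih =>
    intro m hnd h
    have hndy : ys.Nodup := (List.nodup_append.mp hnd).1
    have hxy : x ∉ ys := by
      intro hx
      exact (List.nodup_append.mp hnd).2.2 x hx x List.mem_cons_self rfl
    rw [pvFirstMax?_append_singleton] at h
    cases hys : pvFirstMax? k ys with
    | none =>
      rw [hys] at h
      have hy : ys = [] := (pvFirstMax?_eq_none k ys).mp hys
      subst hy
      cases h
      simp [PySem.List.sorted, PySem.List.insertBy, List.erase_cons_head]
    | some m' =>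
      rw [hys] at h
      dsimp only at h
      by_cases hlt : k m' < k x
      · rw [if_pos hlt] at h
        cases h
        rw [List.erase_append_right _ hxy, List.erase_cons_head, List.append_nil]
        rw [pvSorted_append_singleton]
        have hmax := pvFirstMax?_isMax k ys m' hys
        cases hs : PySem.List.sorted ys k true with
        | nil => simp [PySem.List.insertBy]
        | cons y t =>
          have hy : y ∈ ys := (PySem.List.mem_sorted ys k true y).mp (hs ▸ List.mem_cons_self)
          have hkyx : k y < k x := lt_of_le_of_lt (hmax y hy) hlt
          simp [PySem.List.insertBy, hkyx]
      · rw [if_neg hlt] at h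
        cases h
        have hm' : m ∈ ys := pvFirstMax?_mem k ys m hys
        rw [pvSorted_append_singleton, ih m hndy hys,
          List.erase_append_left _ hm', pvSorted_append_singleton]
        simp [PySem.List.insertBy, hlt]

-- B's scan = first max of the unused positive colors
theorem pvSelScan_eq (after : PySem.Dict String Int) (used : PySem.Set String) :
    ∀ (l : List String) (acc : Option String),
      (∀ x, acc = some x → 0 < after.getD x 0) →
      l.foldl
        (fun best c =>
          if used.contains c then best
          else
            let v := after.getD c 0
            match best with
            | none => if 0 < v then some c else none
            | some b => if 0 < v ∧ after.getD b 0 < v then some c else best) acc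
      = (l.filter (fun c => !used.contains c && decide (0 < after.getD c 0))).foldl
          (pvPick (fun c => after.getD c 0)) acc := by
  intro l
  induction l with
  | nil => intro acc _; rfl
  | cons c r ih =>
    intro acc hacc
    rw [List.foldl_cons, List.filter_cons]
    by_cases hu : used.contains c
    · rw [if_pos hu]
      have hb : (!used.contains c && decide (0 < after.getD c 0)) = false := by rw [hu]; rfl
      rw [hb, if_neg Bool.false_ne_true]
      exact ih acc hacc
    · rw [if_neg hu]
      have hu' : used.contains c = false := by simpa using hu
      by_cases hp : 0 < after.getD c 0
      · have hb : (!used.contains c && decide (0 < after.getD c 0)) = true := by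
          rw [hu']; simp only [Bool.not_false, Bool.true_and]; exact decide_eq_true hp
        rw [hb, if_pos rfl, List.foldl_cons]
        cases acc with
        | none =>
          dsimp only
          rw [if_pos hp]
          exact ih (some c) (by intro x hx; cases hx; exact hp)
        | some a =>
          dsimp only
          by_cases hlt : after.getD a 0 < after.getD c 0
          · rw [if_pos ⟨hp, hlt⟩]
            have hpk : pvPick (fun c => after.getD c 0) (some a) c = some c := by
              simp [pvPick, hlt]
            rw [hpk]
            exact ih (some c) (by intro x hx; cases hx; exact hp)
          · rw [if_neg (by tauto)]
            have hpk : pvPick (fun c => after.getD c 0) (some a) c = some a := by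
              simp [pvPick, hlt]
            rw [hpk]
            exact ih (some a) hacc
      · have hb : (!used.contains c && decide (0 < after.getD c 0)) = false := by
          rw [hu']; simp only [Bool.not_false, Bool.true_and]; exact decide_eq_false hp
        rw [hb, if_neg Bool.false_ne_true]
        cases acc with
        | none =>
          dsimp only
          rw [if_neg hp]
          exact ih none hacc
        | some a =>
          dsimp only
          rw [if_neg (by tauto)]
          exact ih (some a) hacc

theorem pvSelectBest_eq (after : PySem.Dict String Int) (used : PySem.Set String) :
    pvSelectBest after used =
      pvFirstMax? (fun c => after.getD c 0)
        (pvColors.filter (fun c => !used.contains c && decide (0 < after.getD c 0))) := by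
  unfold pvSelectBest pvFirstMax?
  exact pvSelScan_eq after used pvColors none (by intro x hx; cases hx)

-- dropping nonpositive elements does not change a positive first max
theorem pvPick_fold_rel (k : String → Int) :
    ∀ (l : List String) (aP aF : Option String),
      ((aP = aF ∧ (∀ x, aP = some x → 0 < k x)) ∨
        (aP = none ∧ ∃ c0, aF = some c0 ∧ k c0 ≤ 0)) →
      (((l.filter (fun c => decide (0 < k c))).foldl (pvPick k) aP = l.foldl (pvPick k) aF ∧
          (∀ x, (l.filter (fun c => decide (0 < k c))).foldl (pvPick k) aP = some x → 0 < k x)) ∨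
        ((l.filter (fun c => decide (0 < k c))).foldl (pvPick k) aP = none ∧
          ∃ c0, l.foldl (pvPick k) aF = some c0 ∧ k c0 ≤ 0)) := by
  intro l
  induction l with
  | nil => intro aP aF h; exact h
  | cons c r ih =>
    intro aP aF hrel
    rw [List.filter_cons, List.foldl_cons]
    by_cases hp : 0 < k c
    · rw [if_pos (by simpa using hp), List.foldl_cons]
      apply ih
      rcases hrel with ⟨heq, hpos⟩ | ⟨hP, c0, hF, hc0⟩
      · left
        subst heq
        refine ⟨rfl, fun x hx => ?_⟩
        cases aP with
        | none => simp only [pvPick] at hx; cases hx; exact hp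
        | some a =>
          simp only [pvPick] at hx
          by_cases hlt : k a < k c
          · rw [if_pos hlt] at hx; cases hx; exact hp
          · rw [if_neg hlt] at hx; injection hx with hax; subst hax; exact hpos _ rfl
      · left
        subst hP
        rw [hF]
        have : pvPick k (some c0) c = some c := by simp [pvPick, show k c0 < k c by omega]
        rw [this]
        refine ⟨rfl, fun x hx => ?_⟩
        simp only [pvPick] at hx; cases hx; exact hp
    · rw [if_neg (by simpa using hp)]
      apply ih
      rcases hrel with ⟨heq, hpos⟩ | ⟨hP, c0, hF, hc0⟩
      · cases aP with
        | none =>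
          right
          subst heq
          exact ⟨rfl, c, by simp [pvPick], by omega⟩
        | some a =>
          left
          subst heq
          have hka : 0 < k a := hpos a rfl
          have : pvPick k (some a) c = some a := by simp [pvPick, show ¬ k a < k c by omega]
          rw [this]
          exact ⟨rfl, hpos⟩
      · right
        subst hP
        rw [hF]
        refine ⟨rfl, ?_⟩
        by_cases hlt : k c0 < k c
        · exact ⟨c, by simp [pvPick, hlt], by omega⟩
        · exact ⟨c0, by simp [pvPick, hlt], hc0⟩

theorem pvFirstMax?_filter_pos (k : String → Int) (l : List String) (m : String)
    (h : pvFirstMax? k (l.filter (fun c => decide (0 < k c))) = some m) :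
    pvFirstMax? k l = some m := by
  have hrel := pvPick_fold_rel k l none none (Or.inl ⟨rfl, by intro x hx; cases hx⟩)
  unfold pvFirstMax? at h ⊢
  rcases hrel with ⟨heq, _⟩ | ⟨hP, _⟩
  · rw [← heq]; exact h
  · rw [h] at hP; cases hP

-- marking a color used removes exactly it from the unused-color list
theorem pvFilter_add (used : PySem.Set String) (m : String) (l : List String)
    (hm : used.contains m = false) (hl : l.Nodup) :
    l.filter (fun c => !(used.add m).contains c)
      = (l.filter (fun c => !used.contains c)).erase m := by
  have h1 : used.add m = used ++ [m] := by
    unfold PySem.Set.add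
    rw [hm]
    rfl
  rw [h1, (hl.filter _).erase_eq_filter, List.filter_filter]
  apply List.filter_congr
  intro c _
  show (!PySem.Set.contains (used ++ [m]) c) = ((c != m) && !PySem.Set.contains used c)
  unfold PySem.Set.contains
  rw [List.contains_append]
  simp [Bool.not_or, bne, Bool.and_comm, beq_eq_decide]

-- main bridge: greedy over the stably sorted unused colors = B's selection loop
theorem pvMain (after : PySem.Dict String Int) (n : Nat) (e : Int)
    (used : PySem.Set String) (ret : PySem.Dict String Int) (hn : e.toNat ≤ n)
    (hret : ∀ c ∈ pvColors, used.contains c = false → ret.get? c = none) :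
    pvGreedy after
      (PySem.List.sorted (pvColors.filter (fun c => !used.contains c))
        (fun c => after.getD c 0) true) ret e
      = pvLoopB after used ret e := by
  induction n generalizing e used ret with
  | zero =>
    rw [pvLoopB, if_neg (by omega)]
    exact pvGreedy_of_nonpos_e _ _ _ _ (by omega)
  | succ n ih =>
    by_cases he : 0 < e
    case neg =>
      rw [pvLoopB, if_neg he]
      exact pvGreedy_of_nonpos_e _ _ _ _ (by omega)
    rw [pvLoopB, if_pos he]
    have hsel := pvSelectBest_eq after used
    have hff : pvColors.filter (fun c => !used.contains c && decide (0 < after.getD c 0))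
        = (pvColors.filter (fun c => !used.contains c)).filter
            (fun c => decide (0 < after.getD c 0)) := by
      rw [List.filter_filter]
      apply List.filter_congr
      intro c _
      exact (Bool.and_comm _ _)
    split
    case h_1 heq =>
      rw [hsel, hff] at heq
      have hnil := (pvFirstMax?_eq_none _ _).mp heq
      apply pvGreedy_nonpos
      intro c hc
      rw [PySem.List.mem_sorted] at hc
      have := List.filter_eq_nil_iff.mp hnil c hc
      simpa using this
    case h_2 m heq =>
      rw [hsel, hff] at heq
      have hposm : 0 < after.getD m 0 := by
        have hmem := pvFirstMax?_mem _ _ _ heq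
        have := (List.mem_filter.mp hmem).2
        simpa using this
      have hFM : pvFirstMax? (fun c => after.getD c 0)
          (pvColors.filter (fun c => !used.contains c)) = some m :=
        pvFirstMax?_filter_pos _ _ _ heq
      have hmemsub := pvFirstMax?_mem _ _ _ hFM
      have hmcol : m ∈ pvColors := (List.mem_filter.mp hmemsub).1
      have hmused : used.contains m = false := by
        have := (List.mem_filter.mp hmemsub).2
        simpa using this
      have hnd : (pvColors.filter (fun c => !used.contains c)).Nodup :=
        (by decide : pvColors.Nodup).filter _
      rw [pvSorted_extract _ _ m hnd hFM]
      simp only [pvGreedy]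
      rw [if_neg (by omega), if_neg (by omega)]
      have hret0 : ret.getD m 0 = 0 := by
        rw [PySem.Dict.getD_eq_get?_getD, hret m hmcol hmused]
        rfl
      rw [hret0, zero_add,
        ← pvFilter_add used m pvColors hmused (by decide)]
      apply ih
      · omega
      · intro c hc hcu
        have hcm : c ≠ m := by
          intro he'
          subst he'
          have : (used.add c).contains c = true := by
            unfold PySem.Set.add PySem.Set.contains
            have hm' : List.contains used c = false := hmused
            rw [hm']
            simp
          rw [this] at hcu
          cases hcu
        rw [PySem.Dict.get?_insert_of_ne _ _ hcm]
        apply hret c hc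
        have h1 : used.add m = used ++ [m] := by
          unfold PySem.Set.add
          rw [hmused]
          rfl
        rw [h1] at hcu
        unfold PySem.Set.contains at hcu ⊢
        rw [List.contains_append] at hcu
        exact (Bool.or_eq_false_iff.mp hcu).1

-- ===== VERDICT (by name: the statement is the Claim_ definition above) =====
theorem compute_tokens_returned_py_spec : Claim_equal_compute_tokens_returned_py := by
  intro player_tokens tokens_taken limit _
  unfold Spec_compute_tokens_returned_py
  unfold compute_tokens_returned_py compute_tokens_returned_py_alt
  simp only []
  set after := pvAfter player_tokens tokens_taken with hafter
  set ex := max 0 (after.values.foldl (· + ·) 0 - limit) with hex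
  have hex0 : 0 ≤ ex := le_max_left _ _
  by_cases hz : ex = 0
  · rw [if_pos (by simpa using hz), pvLoopB, if_neg (by omega)]
    rfl
  · rw [if_neg (by simpa using hz)]
    rw [pvLoopA_eq_greedy after _ PySem.Dict.empty ex 0
      (((PySem.List.sorted_perm pvColors _ true).nodup_iff).mpr (by decide))
      (by intro _ j _ hj; omega)]
    rw [List.drop_zero]
    rw [show pvColors
        = pvColors.filter (fun c => !(PySem.Set.empty : PySem.Set String).contains c) from rfl]
    rw [pvMain after ex.toNat ex PySem.Set.empty PySem.Dict.empty le_rfl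
      (fun c _ _ => PySem.Dict.get?_empty c)]
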